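-- pv_equiv track=rewrite | github.com/ccaviel/cursor-ai-fullstack | rag_module/agents/n8n_agent.py | _parse_workflow_response
-- ===== SOURCE A (Python) =====
-- from typing import Dict, List, Any
--
-- def _parse_workflow_response(response: str) -> Dict[str, Any]:
--     """Parse the structured workflow response"""
--     components = {}
--     current_key = None
--     current_value = []
--
--     for line in response.split("\n"):
--         line = line.strip()
--         if not line:
--             continue
--
--         if line.startswith(("WORKFLOW:", "PARAMETERS:", "EXECUTION:", "VALIDATION:")):
--             if current_key:
--                 components[current_key] = "\n".join(current_value).strip()
--             current_key = line.split(":")[0].lower()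
--             current_value = [line.split(":", 1)[1].strip()]
--         else:
--             if current_key:
--                 current_value.append(line)
--
--     if current_key:
--         components[current_key] = "\n".join(current_value).strip()
--
--     return components
-- ===== SOURCE B (Python) =====
-- # B: two-phase parse — first cut the cleaned lines into (header, body) segments,
-- # then materialize each segment's value; no streaming current_key/current_value accumulator.
--
-- _HEADERS = ("WORKFLOW:", "PARAMETERS:", "EXECUTION:", "VALIDATION:")
--
--
-- def _is_header(line):
--     return line.startswith(_HEADERS)
--
--
-- def _segments(lines):
--     """Split lines into (header_line, body_lines) pairs, dropping any pre-header lines."""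
--     if not lines:
--         return []
--     head, rest = lines[0], lines[1:]
--     if not _is_header(head):
--         return _segments(rest)
--     n = 0
--     while n < len(rest) and not _is_header(rest[n]):
--         n += 1
--     return [(head, rest[:n])] + _segments(rest[n:])
--
--
-- def _parse_workflow_response(response):
--     lines = [s for s in (l.strip() for l in response.split("\n")) if s]
--     components = {}
--     for header, body in _segments(lines):
--         key = header.split(":")[0].lower()
--         inline = header.split(":", 1)[1].strip()
--         components[key] = "\n".join([inline] + body).strip()
--     return components
-- ===== Notes on version B (the rewrite author's own statement) =====
-- stated objective: alternative
-- what changed: Replaced A's streaming flush-on-header loop with mutable current_key/current_value state by a two-phase parse: first recursively cut the cleaned lines into (header, body) segments, then materialize each segment's value and write it into the dict.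
import Mathlib
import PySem

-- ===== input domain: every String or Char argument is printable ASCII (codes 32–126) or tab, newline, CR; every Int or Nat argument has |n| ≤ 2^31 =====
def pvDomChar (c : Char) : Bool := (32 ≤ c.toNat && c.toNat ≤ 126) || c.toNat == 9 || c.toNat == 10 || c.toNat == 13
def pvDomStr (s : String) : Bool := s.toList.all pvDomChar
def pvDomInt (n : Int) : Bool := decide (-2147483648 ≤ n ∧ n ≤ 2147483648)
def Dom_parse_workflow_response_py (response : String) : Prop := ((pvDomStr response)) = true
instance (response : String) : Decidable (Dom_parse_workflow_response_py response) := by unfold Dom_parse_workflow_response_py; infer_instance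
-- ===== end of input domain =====

-- B replaces A's streaming flush-on-header accumulator loop by a two-phase parse
-- (segment the cleaned lines, then materialize each segment); alternative decomposition, same cost.

-- ===== PORT A =====
-- A's repeated 'if current_key: components[current_key] = "\n".join(current_value).strip()'
-- (Python truthiness: current_key is None or a nonempty lowercased header word here, never "").
def pvAFlush (st : PySem.Dict String String × Option String × List String) :
    PySem.Dict String String :=
  match st.2.1 with
  | some k => st.1.insert k (PySem.Str.strip (PySem.Str.join "\n" st.2.2))
  | none => st.1

-- one iteration of A's 'for line in response.split("\n")' loop body
def pvAStep (st : PySem.Dict String String × Option String × List String) (rawline : String) :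
    PySem.Dict String String × Option String × List String :=
  let line := PySem.Str.strip rawline
  if line = "" then st
  else if PySem.Str.startswith line "WORKFLOW:" || PySem.Str.startswith line "PARAMETERS:" ||
          PySem.Str.startswith line "EXECUTION:" || PySem.Str.startswith line "VALIDATION:" then
    (pvAFlush st,
     -- line.split(":")[0]: split? is none only for sep = "", and [0] always exists
     some (PySem.Str.lower (PySem.List.pyGetD ((PySem.Str.split? line ":").getD []) 0 "")),
     -- line.split(":", 1)[1]: the [1] never raises because a header line contains ':'
     [PySem.Str.strip (PySem.List.pyGetD ((PySem.Str.splitMax? line ":" 1).getD []) 1 "")])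
  else
    match st.2.1 with
    | some _ => (st.1, st.2.1, st.2.2 ++ [line])
    | none => st

def parse_workflow_response_py (response : String) : List (String × String) :=
  (pvAFlush (((PySem.Str.split? response "\n").getD []).foldl pvAStep
      (PySem.Dict.empty, none, []))).items

-- ===== PORT B =====
def pvIsHeader (line : String) : Bool :=
  PySem.Str.startswith line "WORKFLOW:" || PySem.Str.startswith line "PARAMETERS:" ||
  PySem.Str.startswith line "EXECUTION:" || PySem.Str.startswith line "VALIDATION:"

-- Source B's _segments: rest[:n] / rest[n:] at the first header index n are
-- exactly takeWhile / dropWhile of 'not a header'.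
def pvSegments : List String → List (String × List String)
  | [] => []
  | l :: rest =>
    if pvIsHeader l then
      (l, rest.takeWhile (fun x => !pvIsHeader x)) ::
        pvSegments (rest.dropWhile (fun x => !pvIsHeader x))
    else pvSegments rest
  termination_by ls => ls.length
  decreasing_by
  · simpa using Nat.lt_succ_of_le (List.length_dropWhile_le _ _)
  · simp

def parse_workflow_response_py_alt (response : String) : List (String × String) :=
  let lines := (((PySem.Str.split? response "\n").getD []).map PySem.Str.strip).filter
      (fun s => s ≠ "")
  ((pvSegments lines).foldl
    (fun d seg =>
      d.insert (PySem.Str.lower (PySem.List.pyGetD ((PySem.Str.split? seg.1 ":").getD []) 0 ""))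
        (PySem.Str.strip (PySem.Str.join "\n"
          (PySem.Str.strip (PySem.List.pyGetD ((PySem.Str.splitMax? seg.1 ":" 1).getD []) 1 "")
            :: seg.2))))
    PySem.Dict.empty).items

-- ===== PRECONDITION & SPEC =====
def Spec_parse_workflow_response_py (response : String) (out : List (String × String)) : Prop := out = parse_workflow_response_py_alt response
instance (response : String) (out : List (String × String)) : Decidable (Spec_parse_workflow_response_py response out) := by unfold Spec_parse_workflow_response_py; infer_instance

-- ===== CLAIM (what is proved, stated in full; the proofs are below) =====
def Claim_equal_parse_workflow_response_py : Prop := ∀ (response : String), Dom_parse_workflow_response_py response → Spec_parse_workflow_response_py response (parse_workflow_response_py response)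

-- ===== LEMMAS AND PROOFS =====

-- A's loop body on a line that is already stripped and nonempty
def pvG (st : PySem.Dict String String × Option String × List String) (line : String) :
    PySem.Dict String String × Option String × List String :=
  if pvIsHeader line then
    (pvAFlush st,
     some (PySem.Str.lower (PySem.List.pyGetD ((PySem.Str.split? line ":").getD []) 0 "")),
     [PySem.Str.strip (PySem.List.pyGetD ((PySem.Str.splitMax? line ":" 1).getD []) 1 "")])
  else
    match st.2.1 with
    | some _ => (st.1, st.2.1, st.2.2 ++ [line])
    | none => st

-- B's per-segment insertion
def pvIns (d : PySem.Dict String String) (seg : String × List String) :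
    PySem.Dict String String :=
  d.insert (PySem.Str.lower (PySem.List.pyGetD ((PySem.Str.split? seg.1 ":").getD []) 0 ""))
    (PySem.Str.strip (PySem.Str.join "\n"
      (PySem.Str.strip (PySem.List.pyGetD ((PySem.Str.splitMax? seg.1 ":" 1).getD []) 1 "")
        :: seg.2)))

lemma pvAStep_eq (st : PySem.Dict String String × Option String × List String) (x : String) :
    pvAStep st x = if PySem.Str.strip x = "" then st else pvG st (PySem.Str.strip x) := by
  by_cases h : PySem.Str.strip x = "" <;> simp [pvAStep, pvG, pvIsHeader, h]

lemma pvFoldA_eq_foldG (raws : List String)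
    (st : PySem.Dict String String × Option String × List String) :
    raws.foldl pvAStep st
      = ((raws.map PySem.Str.strip).filter (fun s => s ≠ "")).foldl pvG st := by
  calc raws.foldl pvAStep st
      = raws.foldl (fun acc x =>
          if PySem.Str.strip x = "" then acc else pvG acc (PySem.Str.strip x)) st :=
        PySem.List.foldl_congr_mem _ _ _ _ (fun acc x _ => pvAStep_eq acc x)
    _ = (raws.map PySem.Str.strip).foldl
          (fun acc line => if line = "" then acc else pvG acc line) st :=
        by rw [List.foldl_map]
    _ = (raws.map PySem.Str.strip).foldl
          (fun acc line => if line ≠ "" then pvG acc line else acc) st :=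
        PySem.List.foldl_congr_mem _ _ _ _ (fun acc x _ => by
          by_cases h : x = "" <;> simp [h])
    _ = ((raws.map PySem.Str.strip).filter (fun s => s ≠ "")).foldl pvG st :=
        PySem.List.foldl_ite_eq_foldl_filter _ _ _ _

-- the pending segment (k, v) absorbs the leading non-header lines; the rest segments follow
lemma pvLemma2 (ls : List String) (d : PySem.Dict String String) (k : String)
    (v : List String) :
    pvAFlush (ls.foldl pvG (d, some k, v))
      = (pvSegments (ls.dropWhile (fun x => !pvIsHeader x))).foldl pvIns
          (d.insert k (PySem.Str.strip (PySem.Str.join "\n"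
            (v ++ ls.takeWhile (fun x => !pvIsHeader x))))) := by
  induction ls generalizing d k v with
  | nil => simp [pvAFlush, pvSegments]
  | cons l ls ih =>
    by_cases h : pvIsHeader l = true
    · simp only [List.foldl_cons, List.takeWhile_cons, List.dropWhile_cons, h,
        Bool.not_true, Bool.false_eq_true, if_false]
      rw [show pvG (d, some k, v) l
          = (d.insert k (PySem.Str.strip (PySem.Str.join "\n" v)),
             some (PySem.Str.lower (PySem.List.pyGetD ((PySem.Str.split? l ":").getD []) 0 "")),
             [PySem.Str.strip (PySem.List.pyGetD ((PySem.Str.splitMax? l ":" 1).getD []) 1 "")])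
          from by simp [pvG, h, pvAFlush]]
      rw [ih]
      rw [pvSegments]
      simp [h, pvIns]
    · simp only [Bool.not_eq_true] at h
      simp only [List.foldl_cons, List.takeWhile_cons, List.dropWhile_cons, h,
        Bool.not_false, if_true]
      rw [show pvG (d, some k, v) l = (d, some k, v ++ [l]) from by simp [pvG, h]]
      rw [ih]
      simp

lemma pvLemma1 (ls : List String) (d : PySem.Dict String String) (v : List String) :
    pvAFlush (ls.foldl pvG (d, none, v)) = (pvSegments ls).foldl pvIns d := by
  induction ls with
  | nil => simp [pvAFlush, pvSegments]
  | cons l ls ih =>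
    by_cases h : pvIsHeader l = true
    · simp only [List.foldl_cons]
      rw [show pvG (d, none, v) l
          = (d, some (PySem.Str.lower (PySem.List.pyGetD ((PySem.Str.split? l ":").getD []) 0 "")),
             [PySem.Str.strip (PySem.List.pyGetD ((PySem.Str.splitMax? l ":" 1).getD []) 1 "")])
          from by simp [pvG, h, pvAFlush]]
      rw [pvLemma2]
      rw [pvSegments]
      simp [h, pvIns]
    · simp only [Bool.not_eq_true] at h
      simp only [List.foldl_cons]
      rw [show pvG (d, none, v) l = (d, none, v) from by simp [pvG, h]]
      rw [ih, pvSegments]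
      simp [h]

-- ===== VERDICT (by name: the statement is the Claim_ definition above) =====
theorem parse_workflow_response_py_spec : Claim_equal_parse_workflow_response_py := by
  intro response _
  unfold Spec_parse_workflow_response_py parse_workflow_response_py parse_workflow_response_py_alt
  rw [pvFoldA_eq_foldG, pvLemma1]
  rfl
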